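-- pv_equiv track=rewrite | github.com/ayoubzulfiqar/Leetcode-Medium | SmallestPalindromicRearrangementI/smallest_palindromic_rearrangement_i.py | smallestPalindromicRearrangement
-- ===== SOURCE A (Python) =====
-- import collections
--
-- def smallestPalindromicRearrangement(s: str) -> str:
--     char_counts = collections.Counter(s)
--
--     first_half_chars = []
--     middle_char = ""
--
--     for char_code in range(ord('a'), ord('z') + 1):
--         char = chr(char_code)
--         count = char_counts[char]
--
--         if count == 0:
--             continue
--
--         if count % 2 == 1:
--             middle_char = char
--             first_half_chars.extend([char] * ((count - 1) // 2))
--         else: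
--             first_half_chars.extend([char] * (count // 2))
--
--     first_half_str = "".join(first_half_chars)
--
--     return first_half_str + middle_char + first_half_str[::-1]
-- ===== SOURCE B (Python) =====
-- def smallestPalindromicRearrangement(s: str) -> str:
--     chars = sorted(c for c in s if 'a' <= c <= 'z')
--     half_parts = []
--     middle = ""
--     i, n = 0, len(chars)
--     while i < n:
--         j = i + 1
--         while j < n and chars[j] == chars[i]:
--             j += 1
--         cnt = j - i
--         half_parts.append(chars[i] * (cnt // 2))
--         if cnt % 2 == 1:
--             middle = chars[i]
--         i = j
--     half = "".join(half_parts)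
--     return half + middle + half[::-1]
-- ===== Notes on version B (the rewrite author's own statement) =====
-- stated objective: alternative
-- what changed: Replaces A's Counter plus fixed 26-letter alphabet scan with sorting the lowercase letters of s and a single run-length walk over the sorted list (inner scan finds each run; last odd run, i.e. the largest odd-count letter, becomes the middle).
import Mathlib
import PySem

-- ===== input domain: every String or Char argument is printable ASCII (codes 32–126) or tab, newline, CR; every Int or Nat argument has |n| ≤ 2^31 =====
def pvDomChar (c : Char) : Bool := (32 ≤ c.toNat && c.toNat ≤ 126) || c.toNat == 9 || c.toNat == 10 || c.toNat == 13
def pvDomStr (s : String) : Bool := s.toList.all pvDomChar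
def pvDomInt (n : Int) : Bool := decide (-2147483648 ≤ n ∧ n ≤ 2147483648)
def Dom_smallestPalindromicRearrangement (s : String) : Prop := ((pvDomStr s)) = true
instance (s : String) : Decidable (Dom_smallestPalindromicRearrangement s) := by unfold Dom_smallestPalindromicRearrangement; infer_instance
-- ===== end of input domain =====

-- B replaces A's Counter + fixed a–z alphabet scan with a sort of the lowercase letters
-- followed by a single run-length walk (objective: alternative/idiomatic; not claimed faster).

-- ===== PORT A =====
def smallestPalindromicRearrangement (s : String) : String :=
  let cs := s.toList
  let st := (PySem.List.pyRange 97 123 1).foldl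
    (fun (acc : List Char × List Char) code =>
      let ch := Char.ofNat code.toNat
      let count := PySem.List.count cs ch
      if count = 0 then acc
      else if count % 2 = 1 then (acc.1 ++ List.replicate ((count - 1) / 2) ch, [ch])
      else (acc.1 ++ List.replicate (count / 2) ch, acc.2))
    ([], [])
  String.ofList (st.1 ++ st.2 ++ st.1.reverse)

-- ===== PORT B =====
-- the outer while loop of Source B: consume one run of equal characters per step
-- (the inner 'while chars[j] == chars[i]' scan is the takeWhile/dropWhile pair)
def pvRunWalk : List Char → List Char → List Char → List Char × List Char
  | [], half, mid => (half, mid)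
  | c :: rest, half, mid =>
    let cnt := (rest.takeWhile (fun x => x == c)).length + 1
    pvRunWalk (rest.dropWhile (fun x => x == c))
      (half ++ List.replicate (cnt / 2) c)
      (if cnt % 2 = 1 then [c] else mid)
termination_by l => l.length
decreasing_by
  simp only [List.length_cons]
  exact Nat.lt_succ_of_le (List.dropWhile_sublist _).length_le

def smallestPalindromicRearrangement_alt (s : String) : String :=
  let chars := PySem.List.sorted
    (s.toList.filter (fun c => decide ('a' ≤ c) && decide (c ≤ 'z'))) (fun x => x) false
  let st := pvRunWalk chars [] []
  String.ofList (st.1 ++ st.2 ++ st.1.reverse)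

-- ===== PRECONDITION & SPEC =====
def Spec_smallestPalindromicRearrangement (s : String) (out : String) : Prop := out = smallestPalindromicRearrangement_alt s
instance (s : String) (out : String) : Decidable (Spec_smallestPalindromicRearrangement s out) := by unfold Spec_smallestPalindromicRearrangement; infer_instance

-- ===== CLAIM (what is proved, stated in full; the proofs are below) =====
def Claim_equal_smallestPalindromicRearrangement : Prop := ∀ (s : String), Dom_smallestPalindromicRearrangement s → Spec_smallestPalindromicRearrangement s (smallestPalindromicRearrangement s)

-- ===== LEMMAS AND PROOFS =====

-- the alphabet A scans, as characters
def pvLowAlpha : List Char :=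
  ['a','b','c','d','e','f','g','h','i','j','k','l','m',
   'n','o','p','q','r','s','t','u','v','w','x','y','z']

-- A's loop body, per character
def pvStepA (cs : List Char) (acc : List Char × List Char) (ch : Char) : List Char × List Char :=
  let count := PySem.List.count cs ch
  if count = 0 then acc
  else if count % 2 = 1 then (acc.1 ++ List.replicate ((count - 1) / 2) ch, [ch])
  else (acc.1 ++ List.replicate (count / 2) ch, acc.2)

-- the canonical sorted multiset: one run per alphabet letter
def pvCanon (cs : List Char) (alpha : List Char) : List Char :=
  (alpha.map (fun c => List.replicate (List.count c cs) c)).flatten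

lemma pvMem_canon {cs alpha : List Char} {x : Char} (h : x ∈ pvCanon cs alpha) : x ∈ alpha := by
  simp only [pvCanon, List.mem_flatten, List.mem_map] at h
  obtain ⟨l, ⟨c, hc, rfl⟩, hx⟩ := h
  rw [List.eq_of_mem_replicate hx]; exact hc

lemma pvCount_canon (cs : List Char) :
    ∀ (alpha : List Char), alpha.Nodup → ∀ a : Char,
      List.count a (pvCanon cs alpha) = if a ∈ alpha then List.count a cs else 0 := by
  intro alpha
  induction alpha with
  | nil => intro _ a; simp [pvCanon]
  | cons c alpha' ih =>
    intro hnd a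
    have hcanon : pvCanon cs (c :: alpha') =
        List.replicate (List.count c cs) c ++ pvCanon cs alpha' := by
      simp [pvCanon]
    rw [hcanon, List.count_append, List.count_replicate, ih hnd.of_cons a]
    by_cases hac : a = c
    · subst hac
      have : a ∉ alpha' := (List.nodup_cons.mp hnd).1
      simp [this]
    · simp [List.mem_cons, hac, Ne.symm hac]

lemma pvSorted_canon (cs : List Char) :
    ∀ (alpha : List Char), alpha.Pairwise (· < ·) →
      (pvCanon cs alpha).Pairwise (· ≤ ·) := by
  intro alpha
  induction alpha with
  | nil => intro _; simp [pvCanon]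
  | cons c alpha' ih =>
    intro hp
    have hcanon : pvCanon cs (c :: alpha') =
        List.replicate (List.count c cs) c ++ pvCanon cs alpha' := by
      simp [pvCanon]
    rw [hcanon, List.pairwise_append]
    refine ⟨List.pairwise_replicate.mpr (Or.inr le_rfl), ih hp.of_cons, ?_⟩
    intro a ha b hb
    rw [List.eq_of_mem_replicate ha]
    exact le_of_lt (List.rel_of_pairwise_cons hp (pvMem_canon hb))

lemma pvWalk_canon (cs : List Char) :
    ∀ (alpha : List Char), alpha.Pairwise (· < ·) →
      ∀ half mid, pvRunWalk (pvCanon cs alpha) half mid = alpha.foldl (pvStepA cs) (half, mid) := by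
  intro alpha
  induction alpha with
  | nil => intro _ half mid; simp [pvCanon, pvRunWalk]
  | cons c alpha' ih =>
    intro hp half mid
    have htail : ∀ x ∈ pvCanon cs alpha', (x == c) = false := by
      intro x hx
      exact beq_eq_false_iff_ne.mpr (ne_of_gt (List.rel_of_pairwise_cons hp (pvMem_canon hx)))
    have htwnil : List.takeWhile (fun x => x == c) (pvCanon cs alpha') = [] := by
      cases h : pvCanon cs alpha' with
      | nil => rfl
      | cons y ys =>
        have := htail y (h ▸ List.mem_cons_self)
        simp [this]
    have hdwself : List.dropWhile (fun x => x == c) (pvCanon cs alpha') = pvCanon cs alpha' := by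
      cases h : pvCanon cs alpha' with
      | nil => rfl
      | cons y ys =>
        have := htail y (h ▸ List.mem_cons_self)
        simp [this]
    cases hn : List.count c cs with
    | zero =>
      have hcanon : pvCanon cs (c :: alpha') = pvCanon cs alpha' := by
        simp [pvCanon, hn]
      rw [hcanon, ih hp.of_cons half mid, List.foldl_cons]
      have : pvStepA cs (half, mid) c = (half, mid) := by
        simp [pvStepA, PySem.List.count_eq, hn]
      rw [this]
    | succ m =>
      have hcanon : pvCanon cs (c :: alpha') =
          c :: (List.replicate m c ++ pvCanon cs alpha') := by
        simp [pvCanon, hn, List.replicate_succ]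
      rw [hcanon, pvRunWalk]
      have htw : List.takeWhile (fun x => x == c) (List.replicate m c ++ pvCanon cs alpha') =
          List.replicate m c := by
        rw [List.takeWhile_append]
        simp [htwnil]
      have hdw : List.dropWhile (fun x => x == c) (List.replicate m c ++ pvCanon cs alpha') =
          pvCanon cs alpha' := by
        rw [List.dropWhile_append]
        simp [hdwself]
      rw [htw, hdw, List.length_replicate, ih hp.of_cons, List.foldl_cons]
      have hstep : pvStepA cs (half, mid) c =
          (half ++ List.replicate ((m + 1) / 2) c, if (m + 1) % 2 = 1 then [c] else mid) := by
        simp only [pvStepA, PySem.List.count_eq, hn]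
        rw [if_neg (by omega)]
        by_cases hodd : (m + 1) % 2 = 1
        · rw [if_pos hodd, if_pos hodd]
          have : (m + 1 - 1) / 2 = (m + 1) / 2 := by omega
          rw [this]
        · rw [if_neg hodd, if_neg hodd]
      rw [hstep]

set_option maxRecDepth 8192 in
lemma pvMem_alpha_iff (a : Char) : a ∈ pvLowAlpha ↔ ('a' ≤ a ∧ a ≤ 'z') := by
  have hle : ∀ c d : Char, c ≤ d ↔ c.toNat ≤ d.toNat := by
    intro c d; rw [Char.le_def]; exact UInt32.le_iff_toNat_le
  constructor
  · intro h
    rw [hle, hle]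
    fin_cases h <;> decide
  · rintro ⟨h1, h2⟩
    rw [hle] at h1 h2
    have ha97 : Char.toNat 'a' = 97 := by decide
    have hz : Char.toNat 'z' = 122 := by decide
    rw [ha97] at h1
    rw [hz] at h2
    have hn : a.toNat ∈ List.range' 97 26 := by
      rw [List.mem_range'_1]
      exact ⟨h1, by omega⟩
    have hr : List.range' 97 26 = pvLowAlpha.map Char.toNat := by decide
    rw [hr, List.mem_map] at hn
    obtain ⟨x, hx, hxe⟩ := hn
    have : x = a := Char.ext (UInt32.toNat_inj.mp hxe)
    exact this ▸ hx

lemma pvCanon_eq_sorted (cs : List Char) :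
    PySem.List.sorted (cs.filter (fun c => decide ('a' ≤ c) && decide (c ≤ 'z'))) (fun x => x) false
      = pvCanon cs pvLowAlpha := by
  have hperm : (pvCanon cs pvLowAlpha).Perm
      (cs.filter (fun c => decide ('a' ≤ c) && decide (c ≤ 'z'))) := by
    rw [List.perm_iff_count]
    intro a
    rw [pvCount_canon cs pvLowAlpha (by decide) a]
    by_cases hm : a ∈ pvLowAlpha
    · have hp : (decide ('a' ≤ a) && decide (a ≤ 'z')) = true := by
        have := (pvMem_alpha_iff a).mp hm
        simp [this.1, this.2]
      rw [if_pos hm, List.count_filter (p := fun c => decide ('a' ≤ c) && decide (c ≤ 'z')) hp]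
    · have hp : (decide ('a' ≤ a) && decide (a ≤ 'z')) = false := by
        by_contra hc
        exact hm ((pvMem_alpha_iff a).mpr (by simpa using eq_true_of_ne_false hc))
      rw [if_neg hm, eq_comm, List.count_eq_zero]
      intro hc
      rw [List.mem_filter] at hc
      simp [hp] at hc
  exact PySem.List.eq_of_perm_of_pairwise_le_of_injective (fun x : Char => x)
    (fun _ _ h => h)
    ((PySem.List.sorted_perm _ _ _).trans hperm.symm)
    (PySem.List.sorted_pairwise _ _)
    (pvSorted_canon cs pvLowAlpha (by decide))

lemma pvMain (s : String) :
    smallestPalindromicRearrangement s = smallestPalindromicRearrangement_alt s := by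
  have hmap : (PySem.List.pyRange 97 123 1).map (fun code => Char.ofNat code.toNat) = pvLowAlpha := by
    decide
  have key : (PySem.List.pyRange 97 123 1).foldl
      (fun (acc : List Char × List Char) code =>
        let ch := Char.ofNat code.toNat
        let count := PySem.List.count s.toList ch
        if count = 0 then acc
        else if count % 2 = 1 then (acc.1 ++ List.replicate ((count - 1) / 2) ch, [ch])
        else (acc.1 ++ List.replicate (count / 2) ch, acc.2))
      ([], [])
      = pvRunWalk (PySem.List.sorted
          (s.toList.filter (fun c => decide ('a' ≤ c) && decide (c ≤ 'z'))) (fun x => x) false)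
          [] [] := by
    rw [pvCanon_eq_sorted, pvWalk_canon s.toList pvLowAlpha (by decide), ← hmap, List.foldl_map]
    rfl
  simp only [smallestPalindromicRearrangement, smallestPalindromicRearrangement_alt]
  rw [key]

-- ===== VERDICT (by name: the statement is the Claim_ definition above) =====
theorem smallestPalindromicRearrangement_spec : Claim_equal_smallestPalindromicRearrangement := by
  intro s _
  unfold Spec_smallestPalindromicRearrangement
  exact pvMain s
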